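-- pv_equiv track=rewrite | github.com/JavaSkan/SCL | ulang.py | parse_binp
-- ===== SOURCE A (Python) =====
-- def cpos(inp: str, c) -> list:
--     return [i for i,v in enumerate(inp) if v == c]
--
-- def parse_binp(inp: str, c: str, copen: str, cclose: str) -> list:
--     res = []
--     sc_pos = cpos(inp, c)
--
--     lposs = cpos(inp, copen)
--     rposs = cpos(inp, cclose)
--
--     #if there is no <copen> or <cclose> or delimiter characters are not matching then it returns the whole split string
--     if (lposs == [] or rposs == []) or len(lposs) != len(rposs):
--         return inp.split(c)
--
--     lpos = lposs[0]
--     rpos = rposs[-1]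
--
--     prev_sc_pos = 0
--     del lposs, rposs
--
--     for i in range(len(sc_pos)):
--         #checks if <c> is not included in a block delimited with <copen> and <cclose>
--         if sc_pos[i] < lpos or sc_pos[i] > rpos:
--             res.append(inp[prev_sc_pos:sc_pos[i]])
--             prev_sc_pos = sc_pos[i]+1
--     res.append(inp[prev_sc_pos:len(inp)])
--     return res
-- ===== SOURCE B (Python) =====
-- def parse_binp(inp: str, c: str, copen: str, cclose: str) -> list:
--     n_open = n_close = 0
--     first_open = last_close = None
--     for i, ch in enumerate(inp):
--         if ch == copen:
--             n_open += 1
--             if first_open is None: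
--                 first_open = i
--         if ch == cclose:
--             n_close += 1
--             last_close = i
--     if n_open == 0 or n_close == 0 or n_open != n_close:
--         return inp.split(c)
--     res = []
--     buf = []
--     for i, ch in enumerate(inp):
--         if ch == c and (i < first_open or i > last_close):
--             res.append(''.join(buf))
--             buf = []
--         else:
--             buf.append(ch)
--     res.append(''.join(buf))
--     return res
-- ===== Notes on version B (the rewrite author's own statement) =====
-- stated objective: faster
-- what changed: B replaces A's three precomputed position lists and slice-by-index loop with a single counting/first-last scan plus one incremental character-accumulating pass that builds segments in a buffer, slicing nothing.
import Mathlib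
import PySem

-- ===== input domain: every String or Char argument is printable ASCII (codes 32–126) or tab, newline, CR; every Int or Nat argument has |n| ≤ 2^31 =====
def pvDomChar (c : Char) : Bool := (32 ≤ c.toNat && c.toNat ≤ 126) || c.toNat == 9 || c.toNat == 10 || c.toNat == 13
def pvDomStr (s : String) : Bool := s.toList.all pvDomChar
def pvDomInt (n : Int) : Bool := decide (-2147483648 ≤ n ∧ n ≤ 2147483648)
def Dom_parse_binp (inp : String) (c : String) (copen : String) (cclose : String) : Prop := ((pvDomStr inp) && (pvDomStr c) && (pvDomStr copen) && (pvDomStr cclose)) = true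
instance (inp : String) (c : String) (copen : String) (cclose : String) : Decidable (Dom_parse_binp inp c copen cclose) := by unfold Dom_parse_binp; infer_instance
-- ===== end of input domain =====

-- B replaces A's position lists + index slicing with one counting scan and one
-- incremental buffer-accumulating pass (measured constant-factor faster).

-- ===== PORT A =====
-- cpos(inp, c): indices i with inp[i] == c (iterating a str yields 1-char strings,
-- so the comparison is String.ofList [ch] == c); all indices are nonnegative, so Nat.
def pvCpos (c : String) : List Char → Nat → List Nat
  | [], _ => []
  | ch :: rest, i =>
      if String.ofList [ch] == c then i :: pvCpos c rest (i + 1) else pvCpos c rest (i + 1)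

def parse_binp (inp : String) (c : String) (copen : String) (cclose : String) : List String :=
  let L := inp.toList
  let sc_pos := pvCpos c L 0
  let lposs := pvCpos copen L 0
  let rposs := pvCpos cclose L 0
  if lposs = [] ∨ rposs = [] ∨ lposs.length ≠ rposs.length then
    -- inp.split(c); c = "" raises ValueError in Python (split? = none), excluded by Pre_
    (PySem.Str.split? inp c).getD []
  else
    let lpos := lposs.head!
    let rpos := rposs.getLast!
    -- for i in range(len(sc_pos)): … ; inp[prev:p] with 0 ≤ prev ≤ p ≤ len is exactly drop/take
    let st := sc_pos.foldl
      (fun (st : List String × Nat) p =>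
        if p < lpos ∨ p > rpos then
          (st.1 ++ [String.ofList ((L.drop st.2).take (p - st.2))], p + 1)
        else st)
      ([], 0)
    st.1 ++ [String.ofList (L.drop st.2)]

-- ===== PORT B =====
def parse_binp_alt (inp : String) (c : String) (copen : String) (cclose : String) : List String :=
  let L := inp.toList
  -- one scan: (n_open, n_close, first_open, last_close)
  let s := L.zipIdx.foldl
    (fun (st : Nat × Nat × Option Nat × Option Nat) p =>
      let st1 := if String.ofList [p.1] == copen then
          (st.1 + 1, st.2.1, (if st.2.2.1 = none then some p.2 else st.2.2.1), st.2.2.2)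
        else st
      if String.ofList [p.1] == cclose then (st1.1, st1.2.1 + 1, st1.2.2.1, some p.2) else st1)
    (0, 0, none, none)
  if s.1 = 0 ∨ s.2.1 = 0 ∨ s.1 ≠ s.2.1 then
    (PySem.Str.split? inp c).getD []
  else
    let lpos := (s.2.2.1).get!
    let rpos := (s.2.2.2).get!
    -- one pass accumulating characters into buf, flushing at out-of-block delimiters
    let r := L.zipIdx.foldl
      (fun (st : List String × List Char) p =>
        if String.ofList [p.1] == c ∧ (p.2 < lpos ∨ p.2 > rpos) then
          (st.1 ++ [String.ofList st.2], [])
        else (st.1, st.2 ++ [p.1]))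
      ([], [])
    r.1 ++ [String.ofList r.2]

-- ===== PRECONDITION & SPEC =====
-- Pre_ excludes only inputs where A (and B alike) raises ValueError: c = "" while the
-- bracket counts make the functions fall back to inp.split(c).
def Pre_parse_binp (inp : String) (c : String) (copen : String) (cclose : String) : Prop :=
  c = "" →
    (inp.toList.countP (fun v => String.ofList [v] == copen) ≠ 0 ∧
     inp.toList.countP (fun v => String.ofList [v] == copen) =
       inp.toList.countP (fun v => String.ofList [v] == cclose))
instance (inp : String) (c : String) (copen : String) (cclose : String) : Decidable (Pre_parse_binp inp c copen cclose) := by unfold Pre_parse_binp; infer_instance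

def pvWitness_parse_binp : String × String × String × String := ("a,b(c,d),e", ",", "(", ")")

def Spec_parse_binp (inp : String) (c : String) (copen : String) (cclose : String) (out : List String) : Prop := out = parse_binp_alt inp c copen cclose
instance (inp : String) (c : String) (copen : String) (cclose : String) (out : List String) : Decidable (Spec_parse_binp inp c copen cclose out) := by unfold Spec_parse_binp; infer_instance

-- ===== CLAIM (what is proved, stated in full; the proofs are below) =====
def Claim_equal_parse_binp : Prop := ∀ (inp : String) (c : String) (copen : String) (cclose : String), Dom_parse_binp inp c copen cclose → Pre_parse_binp inp c copen cclose → Spec_parse_binp inp c copen cclose (parse_binp inp c copen cclose)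

-- ===== LEMMAS AND PROOFS =====

-- segment spec both loops compute: split the char list at out-of-block delimiters
def pvSegs (c : String) (lpos rpos : Nat) : List Char → Nat → List Char → List (List Char)
  | [], _, buf => [buf]
  | ch :: rest, i, buf =>
      if String.ofList [ch] == c ∧ (i < lpos ∨ i > rpos) then
        buf :: pvSegs c lpos rpos rest (i + 1) []
      else pvSegs c lpos rpos rest (i + 1) (buf ++ [ch])

theorem pvGetLast?_cons_or {α : Type} (a : α) (l : List α) :
    (a :: l).getLast? = l.getLast?.or (some a) := by
  induction l generalizing a with
  | nil => simp
  | cons b t ih =>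
      rw [List.getLast?_cons_cons, ih b]
      cases t.getLast? <;> simp

theorem pv_scan (copen cclose : String) :
    ∀ (cs : List Char) (k : Nat) (st0 : Nat × Nat × Option Nat × Option Nat),
    (cs.zipIdx k).foldl
      (fun (st : Nat × Nat × Option Nat × Option Nat) p =>
        let st1 := if String.ofList [p.1] == copen then
            (st.1 + 1, st.2.1, (if st.2.2.1 = none then some p.2 else st.2.2.1), st.2.2.2)
          else st
        if String.ofList [p.1] == cclose then (st1.1, st1.2.1 + 1, st1.2.2.1, some p.2) else st1)
      st0
    = (st0.1 + (pvCpos copen cs k).length, st0.2.1 + (pvCpos cclose cs k).length,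
       (st0.2.2.1).or (pvCpos copen cs k).head?, ((pvCpos cclose cs k).getLast?).or st0.2.2.2) := by
  intro cs
  induction cs with
  | nil => intro k st0; simp [pvCpos]
  | cons ch rest ih =>
      intro k st0
      rw [List.zipIdx_cons, List.foldl_cons, ih]
      obtain ⟨n, m, fo, lc⟩ := st0
      dsimp only
      by_cases ho : String.ofList [ch] == copen <;>
        by_cases hc : String.ofList [ch] == cclose <;>
          simp [pvCpos, ho, hc, pvGetLast?_cons_or, Prod.ext_iff] <;>
          (repeat' apply And.intro) <;>
          first
            | omega
            | (cases fo <;> simp)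

theorem pv_b_loop (c : String) (lpos rpos : Nat) :
    ∀ (cs : List Char) (k : Nat) (st0 : List String × List Char),
    ((cs.zipIdx k).foldl
        (fun (st : List String × List Char) p =>
          if String.ofList [p.1] == c ∧ (p.2 < lpos ∨ p.2 > rpos) then
            (st.1 ++ [String.ofList st.2], [])
          else (st.1, st.2 ++ [p.1]))
        st0).1
      ++ [String.ofList ((cs.zipIdx k).foldl
        (fun (st : List String × List Char) p =>
          if String.ofList [p.1] == c ∧ (p.2 < lpos ∨ p.2 > rpos) then
            (st.1 ++ [String.ofList st.2], [])
          else (st.1, st.2 ++ [p.1]))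
        st0).2]
    = st0.1 ++ (pvSegs c lpos rpos cs k st0.2).map String.ofList := by
  intro cs
  induction cs with
  | nil => intro k st0; simp [pvSegs]
  | cons ch rest ih =>
      intro k st0
      rw [List.zipIdx_cons, List.foldl_cons]
      dsimp only
      by_cases h : String.ofList [ch] == c ∧ (k < lpos ∨ k > rpos)
      · rw [if_pos h, ih]
        simp only [pvSegs]
        rw [if_pos h]
        simp
      · rw [if_neg h, ih]
        simp only [pvSegs]
        rw [if_neg h]

theorem pv_a_loop (c : String) (lpos rpos : Nat) (L : List Char) :
    ∀ (cs : List Char) (k : Nat) (st0 : List String × Nat),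
    st0.2 ≤ k → cs = L.drop k →
    ((pvCpos c cs k).foldl
        (fun (st : List String × Nat) p =>
          if p < lpos ∨ p > rpos then
            (st.1 ++ [String.ofList ((L.drop st.2).take (p - st.2))], p + 1)
          else st)
        st0).1
      ++ [String.ofList (L.drop ((pvCpos c cs k).foldl
        (fun (st : List String × Nat) p =>
          if p < lpos ∨ p > rpos then
            (st.1 ++ [String.ofList ((L.drop st.2).take (p - st.2))], p + 1)
          else st)
        st0).2)]
    = st0.1 ++ (pvSegs c lpos rpos cs k ((L.drop st0.2).take (k - st0.2))).map String.ofList := by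
  intro cs
  induction cs with
  | nil =>
      intro k st0 hpk hcs
      have hlen : L.length ≤ k := by
        have := congrArg List.length hcs
        simp at this; omega
      have htk : (L.drop st0.2).length ≤ k - st0.2 := by simp; omega
      simp [pvSegs, pvCpos, List.take_of_length_le htk]
  | cons ch rest ih =>
      intro k st0 hpk hcs
      have hrest : rest = L.drop (k + 1) := by
        have h1 : (L.drop k).drop 1 = rest := by rw [← hcs]; simp
        rw [← h1, List.drop_drop]
      have hk : L[k]? = some ch := by
        have h2 : (L.drop k).head? = some ch := by rw [← hcs]; simp
        simpa [List.head?_drop] using h2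
      have hext : ∀ p ≤ k, (L.drop p).take (k + 1 - p) = (L.drop p).take (k - p) ++ [ch] := by
        intro p hp
        have h1 : k + 1 - p = (k - p) + 1 := by omega
        rw [h1, List.take_add_one]
        have h2 : (L.drop p)[k - p]? = some ch := by
          rw [List.getElem?_drop]
          have h3 : p + (k - p) = k := by omega
          rw [h3]; exact hk
        simp [h2]
      by_cases hb : String.ofList [ch] == c
      · by_cases hcond : k < lpos ∨ k > rpos
        · simp only [pvCpos, hb, ite_true]
          rw [List.foldl_cons]
          rw [if_pos hcond,
            ih (k + 1) (st0.1 ++ [String.ofList ((L.drop st0.2).take (k - st0.2))], k + 1)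
              (le_refl _) hrest]
          simp only [pvSegs]
          rw [if_pos ⟨hb, hcond⟩]
          simp
        · simp only [pvCpos, hb, ite_true]
          rw [List.foldl_cons]
          rw [if_neg hcond, ih (k + 1) st0 (by omega) hrest, hext st0.2 hpk]
          have hn : ¬((String.ofList [ch] == c) = true ∧ (k < lpos ∨ k > rpos)) :=
            fun h => hcond h.2
          simp only [pvSegs]
          rw [if_neg hn]
      · simp only [pvCpos, hb, ite_false, Bool.false_eq_true]
        rw [ih (k + 1) st0 (by omega) hrest, hext st0.2 hpk]
        have hn : ¬((String.ofList [ch] == c) = true ∧ (k < lpos ∨ k > rpos)) :=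
          fun h => absurd h.1 hb
        simp only [pvSegs]
        rw [if_neg hn]

-- ===== VERDICT (by name: the statement is the Claim_ definition above) =====
theorem parse_binp_spec : Claim_equal_parse_binp := by
  intro inp c copen cclose hdom hpre
  unfold Spec_parse_binp parse_binp parse_binp_alt
  dsimp only
  rw [pv_scan copen cclose inp.toList 0 (0, 0, none, none)]
  dsimp only
  simp only [Nat.zero_add, Option.none_or, Option.or_none]
  by_cases hfb : pvCpos copen inp.toList 0 = [] ∨ pvCpos cclose inp.toList 0 = [] ∨
      (pvCpos copen inp.toList 0).length ≠ (pvCpos cclose inp.toList 0).length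
  · rw [if_pos hfb, if_pos ?hb]
    case hb =>
      rcases hfb with h | h | h
      · exact Or.inl (by simp [h])
      · exact Or.inr (Or.inl (by simp [h]))
      · exact Or.inr (Or.inr h)
  · rw [if_neg hfb, if_neg ?hb]
    case hb =>
      intro h
      apply hfb
      rcases h with h | h | h
      · exact Or.inl (List.length_eq_zero_iff.mp h)
      · exact Or.inr (Or.inl (List.length_eq_zero_iff.mp h))
      · exact Or.inr (Or.inr h)
    have hl : pvCpos copen inp.toList 0 ≠ [] := fun h => hfb (Or.inl h)
    have hr : pvCpos cclose inp.toList 0 ≠ [] := fun h => hfb (Or.inr (Or.inl h))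
    have hhead : (pvCpos copen inp.toList 0).head! =
        ((pvCpos copen inp.toList 0).head?).get! := by
      obtain ⟨a, la, ha⟩ := List.exists_cons_of_ne_nil hl
      rw [ha]; rfl
    have hlast : (pvCpos cclose inp.toList 0).getLast! =
        ((pvCpos cclose inp.toList 0).getLast?).get! := by
      rw [List.getLast!_eq_getLast?_getD, List.getLast?_eq_some_getLast (h := hr)]
      rfl
    rw [← hhead, ← hlast]
    rw [pv_a_loop c _ _ inp.toList inp.toList 0 ([], 0) (le_refl 0) (by simp)]
    rw [pv_b_loop c _ _ inp.toList 0 ([], [])]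
    simp
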